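-- pv_equiv track=rewrite | github.com/elsh3ar/numerical-methods-app | app.py | make_diagonally_dominant
-- ===== SOURCE A (Python) =====
-- def make_diagonally_dominant(A, b):
--     n = len(A)
--     # بنعمل نسخة عشان منبوظش المصفوفة الأصلية
--     A_new = [row[:] for row in A]
--     b_new = b[:]
--
--     for i in range(n):
--         # بندور على السطر اللي فيه أكبر قيمة في العمود الحالي
--         max_row = i
--         for k in range(i + 1, n):
--             if abs(A_new[k][i]) > abs(A_new[max_row][i]):
--                 max_row = k
--         # بنبدل السطور في A و b
--         A_new[i], A_new[max_row] = A_new[max_row], A_new[i]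
--         b_new[i], b_new[max_row] = b_new[max_row], b_new[i]
--
--     return A_new, b_new
-- ===== SOURCE B (Python) =====
-- def make_diagonally_dominant(A, b):
--     # Recursive selection: pick the row of the remaining block with the largest
--     # |entry| in the current column, emit it (copied), and recurse on the rest
--     # (the displaced first row takes the picked row's slot).
--     def pick(rows, i):
--         m = 0
--         for k in range(1, len(rows)):
--             if abs(rows[k][i]) > abs(rows[m][i]):
--                 m = k
--         return m
--
--     def go(rows, bs, i):
--         if not rows:
--             return [], list(bs)
--         m = pick(rows, i)
--         if m == 0:
--             rest_rows, rest_bs = rows[1:], bs[1:]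
--         else:
--             rest_rows = rows[1:m] + rows[:1] + rows[m + 1:]
--             rest_bs = bs[1:m] + bs[:1] + bs[m + 1:]
--         out_rows, out_bs = go(rest_rows, rest_bs, i + 1)
--         return [list(rows[m])] + out_rows, [bs[m]] + out_bs
--
--     return go(A, b, 0)
-- ===== Notes on version B (the rewrite author's own statement) =====
-- stated objective: alternative
-- what changed: B replaces A's in-place index-swapping loop over fixed arrays with a recursion on the shrinking remaining block: each level picks the row with the largest |entry| in the current column, emits it at the front of the output, and recurses on the rest with the displaced first row slotted into the picked position; Pre_ excludes inputs where A raises IndexError (b shorter than A, or ragged rows shorter than n-1 columns) and the few ragged matrices that accidentally survive A's access order.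
import Mathlib
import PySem

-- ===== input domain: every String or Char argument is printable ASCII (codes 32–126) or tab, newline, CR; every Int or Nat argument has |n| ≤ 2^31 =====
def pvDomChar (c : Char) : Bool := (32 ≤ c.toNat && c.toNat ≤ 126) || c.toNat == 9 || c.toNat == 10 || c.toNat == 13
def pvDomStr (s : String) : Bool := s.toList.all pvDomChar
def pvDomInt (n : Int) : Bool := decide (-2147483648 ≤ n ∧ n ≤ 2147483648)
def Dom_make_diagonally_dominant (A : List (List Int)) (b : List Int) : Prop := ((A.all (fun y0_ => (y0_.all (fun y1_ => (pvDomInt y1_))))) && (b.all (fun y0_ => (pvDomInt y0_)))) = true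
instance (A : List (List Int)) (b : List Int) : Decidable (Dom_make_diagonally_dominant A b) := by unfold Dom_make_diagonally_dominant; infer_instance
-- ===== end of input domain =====

-- B replaces A's in-place index-swapping loop by a recursion on the shrinking remaining
-- block (pick max-|entry| row of the current column, emit it, recurse); alternative decomposition.


-- ===== PORT A =====
-- Python simultaneous swap xs[i], xs[j] = xs[j], xs[i]; defaults only used out of range
-- (inside Pre_ all indices are in range, matching Python exactly).
def pvSwap {α : Type} (xs : List α) (i j : Nat) (d : α) : List α :=
  (xs.set i (xs.getD j d)).set j (xs.getD i d)

-- inner loop: for k in range(i+1, n): if abs(M[k][i]) > abs(M[max_row][i]): max_row = k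
def mddMaxRow (M : List (List Int)) (i n : Nat) : Nat :=
  (List.range' (i + 1) (n - (i + 1))).foldl
    (fun mr k => if |(M.getD k []).getD i 0| > |(M.getD mr []).getD i 0| then k else mr) i

-- A copies A and b ([row[:] for row in A], b[:]) then swaps rows/entries in place;
-- lists are immutable values here, so the copies are the lists themselves.
def make_diagonally_dominant (A : List (List Int)) (b : List Int) : List (List Int) × List Int :=
  let n := A.length
  (List.range n).foldl
    (fun st i =>
      let mr := mddMaxRow st.1 i n
      (pvSwap st.1 i mr [], pvSwap st.2 i mr 0))
    (A, b)

-- ===== PORT B =====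
-- pick(rows, i): index of first row of the block with maximal |row[i]|
def mddPick (rows : List (List Int)) (i : Nat) : Nat :=
  (List.range' 1 (rows.length - 1)).foldl
    (fun m k => if |(rows.getD k []).getD i 0| > |(rows.getD m []).getD i 0| then k else m) 0

-- a fold of "keep the larger index" over indices < n starting below n stays below n
-- (cited by mddGo's termination proof)
theorem fold_max_lt (n : Nat) (f : Nat → Int) :
    ∀ (l : List Nat), (∀ k ∈ l, k < n) → ∀ mr, mr < n →
      l.foldl (fun mr k => if f k > f mr then k else mr) mr < n := by
  intro l
  induction l with
  | nil => intro _ mr hmr; exact hmr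
  | cons k t ih =>
    intro hl mr hmr
    simp only [List.foldl_cons]
    by_cases h : f k > f mr
    · simp only [if_pos h]; exact ih (fun x hx => hl x (by simp [hx])) k (hl k (by simp))
    · simp only [if_neg h]; exact ih (fun x hx => hl x (by simp [hx])) mr hmr

theorem mddPick_lt (rows : List (List Int)) (i : Nat) (h : rows ≠ []) :
    mddPick rows i < rows.length := by
  have hlen : 0 < rows.length := List.length_pos_of_ne_nil h
  unfold mddPick
  refine fold_max_lt rows.length _ _ (fun k hk => ?_) 0 hlen
  rcases List.mem_range'.1 hk with ⟨j, hj, rfl⟩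
  omega

-- go(rows, bs, i): emit rows[pick], recurse on the block with the displaced
-- first row slotted into the picked position (Python slices ported as take/drop)
def mddGo (rows : List (List Int)) (bs : List Int) (i : Nat) : List (List Int) × List Int :=
  if h : rows = [] then ([], bs)
  else
    let m := mddPick rows i
    let restRows := if m = 0 then rows.drop 1
      else (rows.drop 1).take (m - 1) ++ rows.take 1 ++ rows.drop (m + 1)
    let restBs := if m = 0 then bs.drop 1
      else (bs.drop 1).take (m - 1) ++ bs.take 1 ++ bs.drop (m + 1)
    let r := mddGo restRows restBs (i + 1)
    (rows.getD m [] :: r.1, bs.getD m 0 :: r.2)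
termination_by rows.length
decreasing_by
  have hm := mddPick_lt rows i h
  have hlen : 0 < rows.length := List.length_pos_of_ne_nil h
  split_ifs with h0
  · simp; omega
  · simp; omega

def make_diagonally_dominant_alt (A : List (List Int)) (b : List Int) : List (List Int) × List Int :=
  mddGo A b 0

-- ===== PRECONDITION & SPEC =====
-- Pre_ excludes inputs where the Python raises IndexError: b shorter than A, or (for n ≥ 2)
-- a row shorter than n-1 columns.  A few ragged matrices escape the IndexError only because
-- their short rows happen to be frozen into an early position before their missing column is
-- read; those accidental survivals are also excluded (B returns the same value there).
def Pre_make_diagonally_dominant (A : List (List Int)) (b : List Int) : Prop :=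
  A.length ≤ b.length ∧ (A.length ≤ 1 ∨ ∀ row ∈ A, A.length - 1 ≤ row.length)
instance (A : List (List Int)) (b : List Int) : Decidable (Pre_make_diagonally_dominant A b) := by
  unfold Pre_make_diagonally_dominant; infer_instance

def pvWitness_make_diagonally_dominant : List (List Int) × List Int :=
  ([[1, 5], [4, 1]], [2, 3])

def Spec_make_diagonally_dominant (A : List (List Int)) (b : List Int) (out : List (List Int) × List Int) : Prop := out = make_diagonally_dominant_alt A b
instance (A : List (List Int)) (b : List Int) (out : List (List Int) × List Int) : Decidable (Spec_make_diagonally_dominant A b out) := by unfold Spec_make_diagonally_dominant; infer_instance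

-- ===== CLAIM (what is proved, stated in full; the proofs are below) =====
def Claim_equal_make_diagonally_dominant : Prop := ∀ (A : List (List Int)) (b : List Int), Dom_make_diagonally_dominant A b → Pre_make_diagonally_dominant A b → Spec_make_diagonally_dominant A b (make_diagonally_dominant A b)

-- ===== LEMMAS AND PROOFS =====

theorem pvGetD_append_right {α : Type} (P R : List α) (j : Nat) (d : α) :
    (P ++ R).getD (P.length + j) d = R.getD j d := by
  simp [List.getD_eq_getElem?_getD, List.getElem?_append_right (Nat.le_add_right P.length j)]

theorem pvSwap_cons_zero {α : Type} (a : α) (t : List α) (d : α) :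
    pvSwap (a :: t) 0 0 d = a :: t := by
  simp [pvSwap]

theorem pvSwap_cons_succ {α : Type} (a : α) (t : List α) (j : Nat) (d : α) :
    pvSwap (a :: t) 0 (j + 1) d = t.getD j d :: t.set j a := by
  simp [pvSwap]

theorem pvSwap_append_right {α : Type} (P R : List α) (m : Nat) (d : α) (hm : m < R.length) :
    pvSwap (P ++ R) P.length (P.length + m) d = P ++ pvSwap R 0 m d := by
  unfold pvSwap
  rw [pvGetD_append_right P R m d,
      show (P ++ R).getD P.length d = R.getD 0 d from by
        simpa using pvGetD_append_right P R 0 d,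
      List.set_append_right _ _ (Nat.le_refl _), Nat.sub_self,
      List.set_append_right _ _ (Nat.le_add_right _ _), Nat.add_sub_cancel_left]

theorem foldl_shift (i : Nat) (fA fB : Nat → Nat → Nat)
    (h : ∀ mr k, fA (i + mr) (i + k) = i + fB mr k) :
    ∀ (l : List Nat) (m : Nat),
      (l.map (fun x => i + x)).foldl fA (i + m) = i + l.foldl fB m := by
  intro l
  induction l with
  | nil => intro m; rfl
  | cons k t ih =>
    intro m
    simp only [List.map_cons, List.foldl_cons, h m k]
    exact ih (fB m k)

theorem range'_shift (i c : Nat) :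
    List.range' (i + 1) c = (List.range' 1 c).map (fun x => i + x) := by
  rw [List.range'_eq_map_range, List.range'_eq_map_range, List.map_map]
  apply List.map_congr_left
  intro x _
  simp; omega

theorem mddMaxRow_shift (P R : List (List Int)) (n : Nat)
    (hn : n = P.length + R.length) :
    mddMaxRow (P ++ R) P.length n = P.length + mddPick R P.length := by
  unfold mddMaxRow mddPick
  have hc : n - (P.length + 1) = R.length - 1 := by omega
  rw [hc, range'_shift P.length (R.length - 1),
      show P.length = P.length + 0 from rfl]
  refine foldl_shift P.length _ _ (fun mr k => ?_) _ 0
  rw [pvGetD_append_right P R k [], pvGetD_append_right P R mr []]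
  split_ifs <;> omega

theorem set_as_slices {α : Type} (t : List α) (j : Nat) (a : α) (hj : j < t.length) :
    t.take j ++ [a] ++ t.drop (j + 1) = t.set j a := by
  rw [List.set_eq_take_append_cons_drop, if_pos hj]
  simp

-- main invariant: A's remaining fold on (fixed prefix ++ block) equals prefix ++ B's recursion
theorem mdd_main (n : Nat) :
    ∀ (k : Nat) (R P : List (List Int)) (PB bs : List Int),
      R.length = k → PB.length = P.length → n = P.length + R.length → R.length ≤ bs.length →
      (List.range' P.length R.length).foldl
        (fun st i =>
          let mr := mddMaxRow st.1 i n
          (pvSwap st.1 i mr [], pvSwap st.2 i mr 0))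
        (P ++ R, PB ++ bs)
      = (P ++ (mddGo R bs P.length).1, PB ++ (mddGo R bs P.length).2) := by
  intro k
  induction k with
  | zero =>
    intro R P PB bs hk _ _ _
    rcases List.eq_nil_of_length_eq_zero hk with rfl
    simp [mddGo]
  | succ k ih =>
    intro R P PB bs hk hPB hn hbs
    rcases R with _ | ⟨r, t⟩
    · simp at hk
    rcases bs with _ | ⟨c, u⟩
    · simp at hbs
    simp only [List.length_cons] at hk hn hbs
    have hne : (r :: t) ≠ ([] : List (List Int)) := by simp
    have hm : mddPick (r :: t) P.length < t.length + 1 := by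
      simpa using mddPick_lt (r :: t) P.length hne
    set m := mddPick (r :: t) P.length with hmdef
    have hmax : mddMaxRow (P ++ (r :: t)) P.length n = P.length + m := by
      rw [mddMaxRow_shift P (r :: t) n (by simp; omega)]
    have hrange : List.range' P.length (r :: t).length
        = P.length :: List.range' (P.length + 1) t.length := by
      simp [List.range'_succ]
    rw [hrange, List.foldl_cons]
    simp only [hmax]
    rw [pvSwap_append_right P (r :: t) m [] (by simp; omega),
      show pvSwap (PB ++ (c :: u)) P.length (P.length + m) 0
          = PB ++ pvSwap (c :: u) 0 m 0 from by
        rw [← hPB]; exact pvSwap_append_right PB (c :: u) m 0 (by simp; omega)]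
    rw [mddGo]
    simp only [dif_neg hne, ← hmdef]
    rcases m with _ | j
    · -- picked row is already first
      rw [pvSwap_cons_zero, pvSwap_cons_zero]
      have hih := ih t (P ++ [r]) (PB ++ [c]) u (by omega) (by simp [hPB])
        (by simp; omega) (by omega)
      simp only [List.length_append, List.length_cons, List.length_nil,
        Nat.zero_add] at hih
      rw [show P ++ r :: t = P ++ [r] ++ t from by simp,
          show PB ++ c :: u = PB ++ [c] ++ u from by simp, hih]
      simp [List.getD]
    · -- picked row at position j+1 swaps with the first
      have hjt : j < t.length := by omega
      have hju : j < u.length := by omega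
      rw [pvSwap_cons_succ, pvSwap_cons_succ]
      simp only [if_neg (by omega : ¬ (j + 1 = 0))]
      have hsl1 : ((r :: t).drop 1).take (j + 1 - 1) ++ (r :: t).take 1
            ++ (r :: t).drop (j + 1 + 1) = t.set j r := by
        simpa using set_as_slices t j r hjt
      have hsl2 : ((c :: u).drop 1).take (j + 1 - 1) ++ (c :: u).take 1
            ++ (c :: u).drop (j + 1 + 1) = u.set j c := by
        simpa using set_as_slices u j c hju
      rw [hsl1, hsl2]
      have hih := ih (t.set j r) (P ++ [t.getD j []]) (PB ++ [u.getD j 0]) (u.set j c)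
        (by simp; omega) (by simp [hPB]) (by simp; omega) (by simp; omega)
      simp only [List.length_append, List.length_cons, List.length_nil, List.length_set,
        Nat.zero_add] at hih
      rw [show P ++ t.getD j [] :: t.set j r = P ++ [t.getD j []] ++ t.set j r from by simp,
          show PB ++ u.getD j 0 :: u.set j c = PB ++ [u.getD j 0] ++ u.set j c from by simp,
          hih]
      simp [List.getD]

-- ===== VERDICT (by name: the statement is the Claim_ definition above) =====
theorem make_diagonally_dominant_spec : Claim_equal_make_diagonally_dominant := by
  intro A b _ hpre
  unfold Spec_make_diagonally_dominant make_diagonally_dominant make_diagonally_dominant_alt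
  obtain ⟨hb, -⟩ := hpre
  have h := mdd_main A.length A.length A ([] : List (List Int)) ([] : List Int) b
    rfl rfl (by simp) hb
  simp only [List.nil_append, List.length_nil] at h
  simp [List.range_eq_range', h]
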